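-- pv_equiv track=rewrite | github.com/JPmAn24/school-stuff | ramos_legacy.py | sel2
-- ===== SOURCE A (Python) =====
-- def sel2(n):
--     givn = 10
--     amm = 10
--     n -= 1
--     stri = "| 10 "
--     for i in range(n):
--         givn += 10
--         amm += givn
--         stri += "| {} ".format(amm)
--     stri += "|"
--     return stri
-- ===== SOURCE B (Python) =====
-- def sel2(n):
--     terms = [10] + [5 * (k + 2) * (k + 3) for k in range(n - 1)]
--     return "| " + " | ".join(str(t) for t in terms) + " |"
-- ===== Notes on version B (the rewrite author's own statement) =====
-- stated objective: simpler
-- what changed: Replaced the loop carrying two running accumulators (givn, amm) by a closed-form quadratic term per index and a single ' | '.join over the term list.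
import Mathlib
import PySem

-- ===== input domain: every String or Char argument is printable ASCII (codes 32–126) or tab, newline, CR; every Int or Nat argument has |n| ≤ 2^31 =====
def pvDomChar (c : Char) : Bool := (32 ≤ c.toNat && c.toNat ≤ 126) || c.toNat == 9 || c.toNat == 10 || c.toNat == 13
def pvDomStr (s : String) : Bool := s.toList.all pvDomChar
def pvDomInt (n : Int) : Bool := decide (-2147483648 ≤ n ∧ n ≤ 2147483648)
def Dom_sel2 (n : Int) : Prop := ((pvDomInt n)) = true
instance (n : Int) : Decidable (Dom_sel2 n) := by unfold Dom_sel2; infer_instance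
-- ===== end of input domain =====

-- B replaces A's two running accumulators (givn, amm) by the closed form 5*(k+2)*(k+3) per index and one ' | '.join (objective: simpler).

-- ===== PORT A =====
def sel2 (n : Int) : String :=
  let givn : Int := 10
  let amm : Int := 10
  let n := n - 1
  let stri : String := "| 10 "
  let s := (PySem.List.pyRange 0 n 1).foldl
    (fun (s : Int × Int × String) _ =>
      let givn := s.1 + 10
      let amm := s.2.1 + givn
      let stri := s.2.2 ++ ("| " ++ PySem.Int.toStr amm ++ " ")
      (givn, amm, stri)) (givn, amm, stri)
  s.2.2 ++ "|"

-- ===== PORT B =====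
def sel2_alt (n : Int) : String :=
  let terms : List Int := 10 :: (PySem.List.pyRange 0 (n - 1) 1).map (fun k => 5 * (k + 2) * (k + 3))
  "| " ++ PySem.Str.join " | " (terms.map PySem.Int.toStr) ++ " |"

-- ===== PRECONDITION & SPEC =====
def Spec_sel2 (n : Int) (out : String) : Prop := out = sel2_alt n
instance (n : Int) (out : String) : Decidable (Spec_sel2 n out) := by unfold Spec_sel2; infer_instance

-- ===== CLAIM (what is proved, stated in full; the proofs are below) =====
def Claim_equal_sel2 : Prop := ∀ (n : Int), Dom_sel2 n → Spec_sel2 n (sel2 n)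

-- ===== LEMMAS AND PROOFS =====

-- the concatenated "| <term> " cells for indices 0..j-1, the shared shape of both ports' output
def pvBody : Nat → String
  | 0 => ""
  | j + 1 => pvBody j ++ ("| " ++ PySem.Int.toStr (5 * ((j : Int) + 2) * ((j : Int) + 3)) ++ " ")

-- A's fold over range(j) computed: givn = 10*(j+1), amm = 5*(j+1)*(j+2), stri = "| 10 " ++ cells
theorem lemA (j : Nat) :
    (PySem.List.pyRange 0 (j : Int) 1).foldl
      (fun (s : Int × Int × String) _ =>
        let givn := s.1 + 10
        let amm := s.2.1 + givn
        let stri := s.2.2 ++ ("| " ++ PySem.Int.toStr amm ++ " ")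
        (givn, amm, stri)) (10, 10, "| 10 ")
      = (10 * ((j : Int) + 1), 5 * ((j : Int) + 1) * ((j : Int) + 2), "| 10 " ++ pvBody j) := by
  induction j with
  | zero => simp [pvBody]
  | succ j ih =>
      have h : ((j + 1 : Nat) : Int) = (j : Int) + 1 := by push_cast; ring
      rw [h, PySem.List.pyRange_one_succ_right (by positivity), List.foldl_append, ih]
      simp only [List.foldl_cons, List.foldl_nil, pvBody]
      have harg : 5 * ((j : Int) + 1) * ((j : Int) + 2) + (10 * ((j : Int) + 1) + 10)
          = 5 * ((j : Int) + 2) * ((j : Int) + 3) := by ring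
      refine Prod.ext (by ring) (Prod.ext (by dsimp; ring) ?_)
      dsimp
      rw [harg]
      simp [String.append_assoc]

-- joining a nonempty list with one more element appended
theorem join_snoc (sep y x : List Char) (ms : List (List Char)) :
    PySem.Chars.join sep (x :: (ms ++ [y])) = PySem.Chars.join sep (x :: ms) ++ sep ++ y := by
  induction ms generalizing x with
  | nil => simp [PySem.Chars.join_cons_cons, PySem.Chars.join_singleton]
  | cons m ms ih =>
      rw [List.cons_append, PySem.Chars.join_cons_cons, ih, PySem.Chars.join_cons_cons]
      simp [List.append_assoc]

-- B's fenced join over range(j) equals the same "| 10 " ++ cells ++ "|" shape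
theorem lemB (j : Nat) :
    "| " ++ PySem.Str.join " | "
        ((((10 : Int) :: (PySem.List.pyRange 0 (j : Int) 1).map
            (fun k => 5 * (k + 2) * (k + 3))).map PySem.Int.toStr)) ++ " |"
      = ("| 10 " ++ pvBody j) ++ "|" := by
  induction j with
  | zero =>
      apply String.ext
      simp [pvBody, PySem.Str.toList_join, PySem.Chars.join_singleton]
      decide
  | succ j ih =>
      have h : ((j + 1 : Nat) : Int) = (j : Int) + 1 := by push_cast; ring
      rw [h, PySem.List.pyRange_one_succ_right (by positivity)]
      apply String.ext
      have ih' := congrArg String.toList ih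
      simp only [String.toList_append, PySem.Str.toList_join, List.map_map,
        List.map_append, List.map_cons, List.map_nil] at ih' ⊢
      rw [join_snoc]
      simp only [pvBody, String.toList_append]
      have key : "| ".toList ++ PySem.Chars.join " | ".toList
          ((String.toList ∘ PySem.Int.toStr) (10:Int) :: (PySem.List.pyRange 0 (j : Int) 1).map
            ((String.toList ∘ PySem.Int.toStr) ∘ (fun k => 5 * (k + 2) * (k + 3))))
          ++ [' '] = "| 10 ".toList ++ (pvBody j).toList := by
        have step : ∀ (a b : List Char), a ++ " |".toList = b ++ "|".toList → a ++ [' '] = b := by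
          intro a b hab
          have h2 : (a ++ [' ']) ++ ['|'] = b ++ ['|'] := by
            simpa [List.append_assoc] using hab
          exact List.append_cancel_right h2
        refine step _ _ ?_
        simpa [List.append_assoc] using ih'
      calc "| ".toList ++ (PySem.Chars.join " | ".toList
              ((String.toList ∘ PySem.Int.toStr) (10:Int) :: (PySem.List.pyRange 0 (j : Int) 1).map
                ((String.toList ∘ PySem.Int.toStr) ∘ (fun k => 5 * (k + 2) * (k + 3))))
              ++ " | ".toList ++ (String.toList ∘ PySem.Int.toStr) (5 * ((j:Int) + 2) * ((j:Int) + 3))) ++ " |".toList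
          = ("| ".toList ++ PySem.Chars.join " | ".toList
              ((String.toList ∘ PySem.Int.toStr) (10:Int) :: (PySem.List.pyRange 0 (j : Int) 1).map
                ((String.toList ∘ PySem.Int.toStr) ∘ (fun k => 5 * (k + 2) * (k + 3))))
              ++ [' ']) ++ "| ".toList
              ++ (PySem.Int.toStr (5 * ((j:Int) + 2) * ((j:Int) + 3))).toList ++ " |".toList := by
            simp [List.append_assoc]
        _ = _ := by rw [key]; simp [List.append_assoc]

-- ===== VERDICT (by name: the statement is the Claim_ definition above) =====
theorem sel2_spec : Claim_equal_sel2 := by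
  intro n _
  unfold Spec_sel2 sel2 sel2_alt
  by_cases h : n - 1 ≤ 0
  · have hb := lemB 0
    simp only [Nat.cast_zero, PySem.List.pyRange_one_eq_nil (le_refl (0:Int)), List.map_nil,
      pvBody] at hb
    simp only [PySem.List.pyRange_one_eq_nil h, List.foldl_nil, List.map_nil]
    rw [hb]
    simp
  · have hn : ((n - 1).toNat : Int) = n - 1 := Int.toNat_of_nonneg (by omega)
    rw [← hn]
    have hA := lemA (n - 1).toNat
    have hB := lemB (n - 1).toNat
    simp only [hA]
    rw [hB]
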